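-- pv_equiv track=rewrite | github.com/makinzm/atcoder_2 | python/ahc043/a.py | _build_l_shaped_path
-- ===== SOURCE A (Python) =====
-- Pos = tuple[int, int]
--
-- RAIL_HORIZONTAL = 1
--
-- RAIL_VERTICAL = 2
--
-- RAIL_LEFT_DOWN = 3
--
-- RAIL_LEFT_UP = 4
--
-- RAIL_RIGHT_UP = 5
--
-- RAIL_RIGHT_DOWN = 6
--
-- def _build_l_shaped_path(start: Pos, goal: Pos) -> list[tuple[int,int,int]]:
--     """
--     start->goal を「まず上下方向に一直線→そこから水平方向」のL字で結ぶ。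
--     戻り値は「(rail_type, r, c)」のリスト(駅を除く)。
--     """
--     (r0, c0) = start
--     (r1, c1) = goal
--     instructions = []
--     # 垂直方向
--     if r1 > r0:
--         for r in range(r0+1, r1):
--             instructions.append((RAIL_VERTICAL, r, c0))
--         # コーナー
--         if c1 > c0:
--             instructions.append((RAIL_RIGHT_UP, r1, c0))
--         elif c1 < c0:
--             instructions.append((RAIL_LEFT_UP, r1, c0))
--     elif r1 < r0:
--         for r in range(r0-1, r1, -1):
--             instructions.append((RAIL_VERTICAL, r, c0))
--         # コーナー
--         if c1 > c0:
--             instructions.append((RAIL_RIGHT_DOWN, r1, c0))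
--         elif c1 < c0:
--             instructions.append((RAIL_LEFT_DOWN, r1, c0))
--
--     # 水平方向
--     if c1 > c0:
--         for cc in range(c0+1, c1):
--             instructions.append((RAIL_HORIZONTAL, r1, cc))
--     elif c1 < c0:
--         for cc in range(c0-1, c1, -1):
--             instructions.append((RAIL_HORIZONTAL, r1, cc))
--
--     return instructions
-- ===== SOURCE B (Python) =====
-- RAIL_HORIZONTAL = 1
-- RAIL_VERTICAL = 2
-- RAIL_LEFT_DOWN = 3
-- RAIL_LEFT_UP = 4
-- RAIL_RIGHT_UP = 5
-- RAIL_RIGHT_DOWN = 6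
--
-- def _build_l_shaped_path(start, goal):
--     """Chain decomposition: build the full cell chain of the L (vertical leg
--     then horizontal leg), then classify each interior cell by the directions
--     from its predecessor and to its successor."""
--     (r0, c0) = start
--     (r1, c1) = goal
--     step_r = 1 if r1 >= r0 else -1
--     step_c = 1 if c1 >= c0 else -1
--     chain = [(r, c0) for r in range(r0, r1 + step_r, step_r)]
--     chain += [(r1, c) for c in range(c0 + step_c, c1 + step_c, step_c)]
--     out = []
--     for prev, cur, nxt in zip(chain, chain[1:], chain[2:]):
--         din = (cur[0] - prev[0], cur[1] - prev[1])
--         dout = (nxt[0] - cur[0], nxt[1] - cur[1])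
--         if din == dout:
--             rail = RAIL_VERTICAL if din[1] == 0 else RAIL_HORIZONTAL
--         elif dout == (0, 1):
--             rail = RAIL_RIGHT_UP if din == (1, 0) else RAIL_RIGHT_DOWN
--         else:
--             rail = RAIL_LEFT_UP if din == (1, 0) else RAIL_LEFT_DOWN
--         out.append((rail, cur[0], cur[1]))
--     return out
-- ===== Notes on version B (the rewrite author's own statement) =====
-- stated objective: alternative
-- what changed: Instead of three hard-coded emission blocks (vertical loop, corner if-ladder, horizontal loop), B builds the full chain of cells along the L-path and classifies each interior cell from the directions to its neighbours, deriving straight vs corner tiles from the geometry.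
import Mathlib
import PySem

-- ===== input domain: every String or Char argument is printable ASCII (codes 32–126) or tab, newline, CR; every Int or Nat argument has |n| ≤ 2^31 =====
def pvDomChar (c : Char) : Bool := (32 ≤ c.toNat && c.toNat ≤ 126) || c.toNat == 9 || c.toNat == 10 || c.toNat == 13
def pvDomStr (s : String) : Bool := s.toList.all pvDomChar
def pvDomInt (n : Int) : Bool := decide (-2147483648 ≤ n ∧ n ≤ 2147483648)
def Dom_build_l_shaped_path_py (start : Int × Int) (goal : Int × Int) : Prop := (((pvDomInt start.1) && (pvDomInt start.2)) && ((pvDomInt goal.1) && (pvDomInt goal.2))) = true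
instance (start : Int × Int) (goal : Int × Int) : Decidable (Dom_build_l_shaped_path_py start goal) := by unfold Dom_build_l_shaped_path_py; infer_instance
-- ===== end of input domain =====

-- B rebuilds the path as the explicit chain of cells (vertical leg then horizontal leg)
-- and classifies each interior cell from its neighbour directions (objective: alternative decomposition).

-- ===== PORT A =====
def build_l_shaped_path_py (start : Int × Int) (goal : Int × Int) : List (Int × Int × Int) :=
  let r0 := start.1; let c0 := start.2
  let r1 := goal.1; let c1 := goal.2
  let instructions : List (Int × Int × Int) := []
  let instructions :=
    if r1 > r0 then
      let instructions := (PySem.List.pyRange (r0+1) r1 1).foldl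
        (fun acc r => acc ++ [((2 : Int), r, c0)]) instructions
      if c1 > c0 then instructions ++ [((5 : Int), r1, c0)]
      else if c1 < c0 then instructions ++ [((4 : Int), r1, c0)]
      else instructions
    else if r1 < r0 then
      let instructions := (PySem.List.pyRange (r0-1) r1 (-1)).foldl
        (fun acc r => acc ++ [((2 : Int), r, c0)]) instructions
      if c1 > c0 then instructions ++ [((6 : Int), r1, c0)]
      else if c1 < c0 then instructions ++ [((3 : Int), r1, c0)]
      else instructions
    else instructions
  if c1 > c0 then (PySem.List.pyRange (c0+1) c1 1).foldl
      (fun acc cc => acc ++ [((1 : Int), r1, cc)]) instructions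
  else if c1 < c0 then (PySem.List.pyRange (c0-1) c1 (-1)).foldl
      (fun acc cc => acc ++ [((1 : Int), r1, cc)]) instructions
  else instructions

-- ===== PORT B =====
def build_l_shaped_path_py_alt (start : Int × Int) (goal : Int × Int) : List (Int × Int × Int) :=
  let r0 := start.1; let c0 := start.2
  let r1 := goal.1; let c1 := goal.2
  let step_r : Int := if r1 ≥ r0 then 1 else -1
  let step_c : Int := if c1 ≥ c0 then 1 else -1
  let chain := (PySem.List.pyRange r0 (r1 + step_r) step_r).map (fun r => (r, c0))
            ++ (PySem.List.pyRange (c0 + step_c) (c1 + step_c) step_c).map (fun c => (r1, c))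
  let triples := List.zip chain (List.zip
      (PySem.List.slice chain (some 1) none) (PySem.List.slice chain (some 2) none))
  triples.foldl (fun out t =>
    let prev := t.1; let cur := t.2.1; let nxt := t.2.2
    let din := (cur.1 - prev.1, cur.2 - prev.2)
    let dout := (nxt.1 - cur.1, nxt.2 - cur.2)
    let rail : Int :=
      if din = dout then (if din.2 = 0 then 2 else 1)
      else if dout = (0, 1) then (if din = (1, 0) then 5 else 6)
      else (if din = (1, 0) then 4 else 3)
    out ++ [(rail, cur.1, cur.2)]) []

-- ===== PRECONDITION & SPEC =====
def Spec_build_l_shaped_path_py (start : Int × Int) (goal : Int × Int) (out : List (Int × Int × Int)) : Prop := out = build_l_shaped_path_py_alt start goal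
instance (start : Int × Int) (goal : Int × Int) (out : List (Int × Int × Int)) : Decidable (Spec_build_l_shaped_path_py start goal out) := by unfold Spec_build_l_shaped_path_py; infer_instance

-- ===== CLAIM (what is proved, stated in full; the proofs are below) =====
def Claim_equal_build_l_shaped_path_py : Prop := ∀ (start : Int × Int) (goal : Int × Int), Dom_build_l_shaped_path_py start goal → Spec_build_l_shaped_path_py start goal (build_l_shaped_path_py start goal)

-- ===== LEMMAS AND PROOFS =====

/-- The rail tile B picks for an interior cell `c` between neighbours `p` and `n`. -/
def railOf (p c n : Int × Int) : Int :=
  let din := (c.1 - p.1, c.2 - p.2)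
  let dout := (n.1 - c.1, n.2 - c.2)
  if din = dout then (if din.2 = 0 then 2 else 1)
  else if dout = (0, 1) then (if din = (1, 0) then 5 else 6)
  else (if din = (1, 0) then 4 else 3)

/-- Structural form of B's interior walk. -/
def gwalk : List (Int × Int) → List (Int × Int × Int)
  | p :: c :: n :: t => (railOf p c n, c.1, c.2) :: gwalk (c :: n :: t)
  | _ => []

lemma gwalk_cons (a b c : Int × Int) (t : List (Int × Int)) :
    gwalk (a :: b :: c :: t) = (railOf a b c, b.1, b.2) :: gwalk (b :: c :: t) := rfl

lemma trip_map : ∀ (chain : List (Int × Int)),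
    (List.zip chain (List.zip (chain.drop 1) (chain.drop 2))).map
        (fun t => (railOf t.1 t.2.1 t.2.2, t.2.1.1, t.2.1.2)) = gwalk chain
  | [] => by simp [gwalk]
  | [a] => by simp [gwalk]
  | [a, b] => by simp [gwalk, List.zip]
  | a :: b :: c :: t => by
      have ih := trip_map (b :: c :: t)
      simpa [gwalk, List.zip] using ih

lemma alt_eq_gwalk (start goal : Int × Int) :
    build_l_shaped_path_py_alt start goal =
      gwalk ((PySem.List.pyRange start.1 (goal.1 + (if goal.1 ≥ start.1 then 1 else -1))
                (if goal.1 ≥ start.1 then 1 else -1)).map (fun r => (r, start.2))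
          ++ (PySem.List.pyRange (start.2 + (if goal.2 ≥ start.2 then 1 else -1))
                (goal.2 + (if goal.2 ≥ start.2 then 1 else -1))
                (if goal.2 ≥ start.2 then 1 else -1)).map (fun c => (goal.1, c))) := by
  have h2 : ∀ (l : List (Int × Int)), PySem.List.slice l (some 2) none = l.drop 2 :=
    fun l => by simpa using PySem.List.slice_from_natCast l 2
  unfold build_l_shaped_path_py_alt
  rw [PySem.List.foldl_append_singleton_eq_map, PySem.List.slice_from_one, h2,
    List.nil_append, ← List.drop_one]
  exact trip_map _

-- rail-type evaluations for B's classifier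
lemma railOf_vert (p1 c1 n1 c2 : Int) (h : c1 - p1 = n1 - c1) :
    railOf (p1, c2) (c1, c2) (n1, c2) = 2 := by
  simp [railOf, h]

lemma railOf_horiz (r p2 c2 n2 : Int) (h : c2 - p2 = n2 - c2) (h2 : c2 ≠ p2) :
    railOf (r, p2) (r, c2) (r, n2) = 1 := by
  simp only [railOf]
  rw [h, if_pos rfl, if_neg (show ¬(n2 - c2 = 0) by omega)]

lemma railOf_c5 (p1 c1 c2 n2 : Int) (hv : c1 - p1 = 1) (hh : n2 - c2 = 1) :
    railOf (p1, c2) (c1, c2) (c1, n2) = 5 := by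
  simp [railOf, hv, hh]

lemma railOf_c4 (p1 c1 c2 n2 : Int) (hv : c1 - p1 = 1) (hh : n2 - c2 = -1) :
    railOf (p1, c2) (c1, c2) (c1, n2) = 4 := by
  simp [railOf, hv, hh]

lemma railOf_c6 (p1 c1 c2 n2 : Int) (hv : c1 - p1 = -1) (hh : n2 - c2 = 1) :
    railOf (p1, c2) (c1, c2) (c1, n2) = 6 := by
  simp [railOf, hv, hh]

lemma railOf_c3 (p1 c1 c2 n2 : Int) (hv : c1 - p1 = -1) (hh : n2 - c2 = -1) :
    railOf (p1, c2) (c1, c2) (c1, n2) = 3 := by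
  simp [railOf, hv, hh]

-- straight-run lemmas
lemma hrun_right (k : Nat) : ∀ (a r : Int),
    gwalk ((r, a - 1) :: (PySem.List.pyRange a (a + k + 1) 1).map (fun x => (r, x)))
      = (PySem.List.pyRange a (a + k) 1).map (fun x => ((1 : Int), r, x)) := by
  induction k with
  | zero =>
      intro a r
      rw [show a + ((0 : Nat) : Int) + 1 = a + 1 by push_cast; ring, PySem.List.pyRange_one_singleton,
        show a + ((0 : Nat) : Int) = a by push_cast; ring, PySem.List.pyRange_one_eq_nil le_rfl]
      simp [gwalk]
  | succ k ih =>
      intro a r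
      rw [show a + ((k + 1 : Nat) : Int) + 1 = a + 1 + (k : Nat) + 1 by push_cast; ring,
        show a + ((k + 1 : Nat) : Int) = a + 1 + (k : Nat) by push_cast; ring]
      have h1 : PySem.List.pyRange a (a + 1 + (k : Nat) + 1) 1
          = a :: PySem.List.pyRange (a + 1) (a + 1 + (k : Nat) + 1) 1 :=
        PySem.List.pyRange_one_cons (by omega)
      have h2 : PySem.List.pyRange (a + 1) (a + 1 + (k : Nat) + 1) 1
          = (a + 1) :: PySem.List.pyRange (a + 1 + 1) (a + 1 + (k : Nat) + 1) 1 :=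
        PySem.List.pyRange_one_cons (by omega)
      have h3 : PySem.List.pyRange a (a + 1 + (k : Nat)) 1
          = a :: PySem.List.pyRange (a + 1) (a + 1 + (k : Nat)) 1 :=
        PySem.List.pyRange_one_cons (by omega)
      rw [h1, h2, List.map_cons, List.map_cons, gwalk_cons,
        railOf_horiz r (a - 1) a (a + 1) (by ring) (by omega), h3, List.map_cons]
      have ih' := ih (a + 1) r
      rw [show a + 1 - 1 = a by ring, h2, List.map_cons] at ih'
      rw [ih']

lemma hrun_left (k : Nat) : ∀ (a r : Int),
    gwalk ((r, a + 1) :: (PySem.List.pyRange a (a - k - 1) (-1)).map (fun x => (r, x)))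
      = (PySem.List.pyRange a (a - k) (-1)).map (fun x => ((1 : Int), r, x)) := by
  induction k with
  | zero =>
      intro a r
      rw [show a - ((0 : Nat) : Int) - 1 = a - 1 by push_cast; ring,
        show a - ((0 : Nat) : Int) = a by push_cast; ring,
        PySem.List.pyRange_neg_one_cons (by omega : a - 1 < a),
        PySem.List.pyRange_neg_one_eq_nil (by omega : a - 1 ≤ a - 1),
        PySem.List.pyRange_neg_one_eq_nil (by omega : a ≤ a)]
      simp [gwalk]
  | succ k ih =>
      intro a r
      rw [show a - ((k + 1 : Nat) : Int) - 1 = a - 1 - (k : Nat) - 1 by push_cast; ring,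
        show a - ((k + 1 : Nat) : Int) = a - 1 - (k : Nat) by push_cast; ring]
      have h1 : PySem.List.pyRange a (a - 1 - (k : Nat) - 1) (-1)
          = a :: PySem.List.pyRange (a - 1) (a - 1 - (k : Nat) - 1) (-1) :=
        PySem.List.pyRange_neg_one_cons (by omega)
      have h2 : PySem.List.pyRange (a - 1) (a - 1 - (k : Nat) - 1) (-1)
          = (a - 1) :: PySem.List.pyRange (a - 1 - 1) (a - 1 - (k : Nat) - 1) (-1) :=
        PySem.List.pyRange_neg_one_cons (by omega)
      have h3 : PySem.List.pyRange a (a - 1 - (k : Nat)) (-1)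
          = a :: PySem.List.pyRange (a - 1) (a - 1 - (k : Nat)) (-1) :=
        PySem.List.pyRange_neg_one_cons (by omega)
      rw [h1, h2, List.map_cons, List.map_cons, gwalk_cons,
        railOf_horiz r (a + 1) a (a - 1) (by ring) (by omega), h3, List.map_cons]
      have ih' := ih (a - 1) r
      rw [show a - 1 + 1 = a by ring, h2, List.map_cons] at ih'
      rw [ih']

lemma peel_down (c0 : Int) (k : Nat) : ∀ (r0 : Int) (rest : List (Int × Int)),
    gwalk ((PySem.List.pyRange r0 (r0 + k + 2) 1).map (fun r => (r, c0)) ++ rest)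
      = (PySem.List.pyRange (r0 + 1) (r0 + k + 1) 1).map (fun r => ((2 : Int), r, c0))
        ++ gwalk ((r0 + k, c0) :: (r0 + k + 1, c0) :: rest) := by
  induction k with
  | zero =>
      intro r0 rest
      rw [show r0 + ((0 : Nat) : Int) + 2 = r0 + 2 by push_cast; ring,
        show r0 + ((0 : Nat) : Int) + 1 = r0 + 1 by push_cast; ring,
        show r0 + ((0 : Nat) : Int) = r0 by push_cast; ring,
        PySem.List.pyRange_one_cons (by omega : r0 < r0 + 2),
        PySem.List.pyRange_one_cons (by omega : r0 + 1 < r0 + 2),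
        PySem.List.pyRange_one_eq_nil (by omega : r0 + 2 ≤ r0 + 1 + 1),
        PySem.List.pyRange_one_eq_nil (by omega : r0 + 1 ≤ r0 + 1)]
      simp
  | succ k ih =>
      intro r0 rest
      rw [show r0 + ((k + 1 : Nat) : Int) + 2 = r0 + 1 + (k : Nat) + 2 by push_cast; ring,
        show r0 + ((k + 1 : Nat) : Int) + 1 = r0 + 1 + (k : Nat) + 1 by push_cast; ring,
        show r0 + ((k + 1 : Nat) : Int) = r0 + 1 + (k : Nat) by push_cast; ring]
      have h1 : PySem.List.pyRange r0 (r0 + 1 + (k : Nat) + 2) 1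
          = r0 :: PySem.List.pyRange (r0 + 1) (r0 + 1 + (k : Nat) + 2) 1 :=
        PySem.List.pyRange_one_cons (by omega)
      have h2 : PySem.List.pyRange (r0 + 1) (r0 + 1 + (k : Nat) + 2) 1
          = (r0 + 1) :: PySem.List.pyRange (r0 + 1 + 1) (r0 + 1 + (k : Nat) + 2) 1 :=
        PySem.List.pyRange_one_cons (by omega)
      have h3 : PySem.List.pyRange (r0 + 1 + 1) (r0 + 1 + (k : Nat) + 2) 1
          = (r0 + 1 + 1) :: PySem.List.pyRange (r0 + 1 + 1 + 1) (r0 + 1 + (k : Nat) + 2) 1 :=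
        PySem.List.pyRange_one_cons (by omega)
      have h4 : PySem.List.pyRange (r0 + 1) (r0 + 1 + (k : Nat) + 1) 1
          = (r0 + 1) :: PySem.List.pyRange (r0 + 1 + 1) (r0 + 1 + (k : Nat) + 1) 1 :=
        PySem.List.pyRange_one_cons (by omega)
      rw [h1, h2, h3, List.map_cons, List.map_cons, List.map_cons,
        List.cons_append, List.cons_append, List.cons_append, gwalk_cons,
        railOf_vert r0 (r0 + 1) (r0 + 1 + 1) c0 (by ring), h4, List.map_cons, List.cons_append]
      have ih' := ih (r0 + 1) rest
      rw [h2, h3, List.map_cons, List.map_cons, List.cons_append, List.cons_append] at ih'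
      rw [ih']

lemma peel_up (c0 : Int) (k : Nat) : ∀ (r0 : Int) (rest : List (Int × Int)),
    gwalk ((PySem.List.pyRange r0 (r0 - k - 2) (-1)).map (fun r => (r, c0)) ++ rest)
      = (PySem.List.pyRange (r0 - 1) (r0 - k - 1) (-1)).map (fun r => ((2 : Int), r, c0))
        ++ gwalk ((r0 - k, c0) :: (r0 - k - 1, c0) :: rest) := by
  induction k with
  | zero =>
      intro r0 rest
      rw [show r0 - ((0 : Nat) : Int) - 2 = r0 - 2 by push_cast; ring,
        show r0 - ((0 : Nat) : Int) - 1 = r0 - 1 by push_cast; ring,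
        show r0 - ((0 : Nat) : Int) = r0 by push_cast; ring,
        PySem.List.pyRange_neg_one_cons (by omega : r0 - 2 < r0),
        PySem.List.pyRange_neg_one_cons (by omega : r0 - 2 < r0 - 1),
        PySem.List.pyRange_neg_one_eq_nil (by omega : r0 - 1 - 1 ≤ r0 - 2),
        PySem.List.pyRange_neg_one_eq_nil (by omega : r0 - 1 ≤ r0 - 1)]
      simp
  | succ k ih =>
      intro r0 rest
      rw [show r0 - ((k + 1 : Nat) : Int) - 2 = r0 - 1 - (k : Nat) - 2 by push_cast; ring,
        show r0 - ((k + 1 : Nat) : Int) - 1 = r0 - 1 - (k : Nat) - 1 by push_cast; ring,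
        show r0 - ((k + 1 : Nat) : Int) = r0 - 1 - (k : Nat) by push_cast; ring]
      have h1 : PySem.List.pyRange r0 (r0 - 1 - (k : Nat) - 2) (-1)
          = r0 :: PySem.List.pyRange (r0 - 1) (r0 - 1 - (k : Nat) - 2) (-1) :=
        PySem.List.pyRange_neg_one_cons (by omega)
      have h2 : PySem.List.pyRange (r0 - 1) (r0 - 1 - (k : Nat) - 2) (-1)
          = (r0 - 1) :: PySem.List.pyRange (r0 - 1 - 1) (r0 - 1 - (k : Nat) - 2) (-1) :=
        PySem.List.pyRange_neg_one_cons (by omega)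
      have h3 : PySem.List.pyRange (r0 - 1 - 1) (r0 - 1 - (k : Nat) - 2) (-1)
          = (r0 - 1 - 1) :: PySem.List.pyRange (r0 - 1 - 1 - 1) (r0 - 1 - (k : Nat) - 2) (-1) :=
        PySem.List.pyRange_neg_one_cons (by omega)
      have h4 : PySem.List.pyRange (r0 - 1) (r0 - 1 - (k : Nat) - 1) (-1)
          = (r0 - 1) :: PySem.List.pyRange (r0 - 1 - 1) (r0 - 1 - (k : Nat) - 1) (-1) :=
        PySem.List.pyRange_neg_one_cons (by omega)
      rw [h1, h2, h3, List.map_cons, List.map_cons, List.map_cons,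
        List.cons_append, List.cons_append, List.cons_append, gwalk_cons,
        railOf_vert r0 (r0 - 1) (r0 - 1 - 1) c0 (by ring), h4, List.map_cons, List.cons_append]
      have ih' := ih (r0 - 1) rest
      rw [h2, h3, List.map_cons, List.map_cons, List.cons_append, List.cons_append] at ih'
      rw [ih']

-- corner + horizontal residuals
lemma corner_dr (rA r1 c0 : Int) (m : Nat) (h : r1 - rA = 1) :
    gwalk ((rA, c0) :: (r1, c0) :: (PySem.List.pyRange (c0 + 1) (c0 + 1 + m + 1) 1).map (fun c => (r1, c)))
      = ((5 : Int), r1, c0) :: (PySem.List.pyRange (c0 + 1) (c0 + 1 + m) 1).map (fun c => ((1 : Int), r1, c)) := by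
  have h1 : PySem.List.pyRange (c0 + 1) (c0 + 1 + (m : Nat) + 1) 1
      = (c0 + 1) :: PySem.List.pyRange (c0 + 1 + 1) (c0 + 1 + (m : Nat) + 1) 1 :=
    PySem.List.pyRange_one_cons (by omega)
  rw [h1, List.map_cons, gwalk_cons, railOf_c5 rA r1 c0 (c0 + 1) h (by ring)]
  have hr := hrun_right m (c0 + 1) r1
  rw [show c0 + 1 - 1 = c0 by ring, h1, List.map_cons] at hr
  rw [hr]

lemma corner_dl (rA r1 c0 : Int) (m : Nat) (h : r1 - rA = 1) :
    gwalk ((rA, c0) :: (r1, c0) :: (PySem.List.pyRange (c0 - 1) (c0 - 1 - m - 1) (-1)).map (fun c => (r1, c)))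
      = ((4 : Int), r1, c0) :: (PySem.List.pyRange (c0 - 1) (c0 - 1 - m) (-1)).map (fun c => ((1 : Int), r1, c)) := by
  have h1 : PySem.List.pyRange (c0 - 1) (c0 - 1 - (m : Nat) - 1) (-1)
      = (c0 - 1) :: PySem.List.pyRange (c0 - 1 - 1) (c0 - 1 - (m : Nat) - 1) (-1) :=
    PySem.List.pyRange_neg_one_cons (by omega)
  rw [h1, List.map_cons, gwalk_cons, railOf_c4 rA r1 c0 (c0 - 1) h (by ring)]
  have hr := hrun_left m (c0 - 1) r1
  rw [show c0 - 1 + 1 = c0 by ring, h1, List.map_cons] at hr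
  rw [hr]

lemma corner_ur (rA r1 c0 : Int) (m : Nat) (h : r1 - rA = -1) :
    gwalk ((rA, c0) :: (r1, c0) :: (PySem.List.pyRange (c0 + 1) (c0 + 1 + m + 1) 1).map (fun c => (r1, c)))
      = ((6 : Int), r1, c0) :: (PySem.List.pyRange (c0 + 1) (c0 + 1 + m) 1).map (fun c => ((1 : Int), r1, c)) := by
  have h1 : PySem.List.pyRange (c0 + 1) (c0 + 1 + (m : Nat) + 1) 1
      = (c0 + 1) :: PySem.List.pyRange (c0 + 1 + 1) (c0 + 1 + (m : Nat) + 1) 1 :=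
    PySem.List.pyRange_one_cons (by omega)
  rw [h1, List.map_cons, gwalk_cons, railOf_c6 rA r1 c0 (c0 + 1) h (by ring)]
  have hr := hrun_right m (c0 + 1) r1
  rw [show c0 + 1 - 1 = c0 by ring, h1, List.map_cons] at hr
  rw [hr]

lemma corner_ul (rA r1 c0 : Int) (m : Nat) (h : r1 - rA = -1) :
    gwalk ((rA, c0) :: (r1, c0) :: (PySem.List.pyRange (c0 - 1) (c0 - 1 - m - 1) (-1)).map (fun c => (r1, c)))
      = ((3 : Int), r1, c0) :: (PySem.List.pyRange (c0 - 1) (c0 - 1 - m) (-1)).map (fun c => ((1 : Int), r1, c)) := by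
  have h1 : PySem.List.pyRange (c0 - 1) (c0 - 1 - (m : Nat) - 1) (-1)
      = (c0 - 1) :: PySem.List.pyRange (c0 - 1 - 1) (c0 - 1 - (m : Nat) - 1) (-1) :=
    PySem.List.pyRange_neg_one_cons (by omega)
  rw [h1, List.map_cons, gwalk_cons, railOf_c3 rA r1 c0 (c0 - 1) h (by ring)]
  have hr := hrun_left m (c0 - 1) r1
  rw [show c0 - 1 + 1 = c0 by ring, h1, List.map_cons] at hr
  rw [hr]

-- ===== VERDICT (by name: the statement is the Claim_ definition above) =====
theorem build_l_shaped_path_py_spec : Claim_equal_build_l_shaped_path_py := by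
  intro start goal _
  obtain ⟨r0, c0⟩ := start
  obtain ⟨r1, c1⟩ := goal
  show build_l_shaped_path_py (r0, c0) (r1, c1) = build_l_shaped_path_py_alt (r0, c0) (r1, c1)
  rw [alt_eq_gwalk]
  simp only [build_l_shaped_path_py]
  split_ifs
  all_goals try (exfalso; omega)
  -- down-right
  · obtain ⟨k, hk⟩ : ∃ k : Nat, r1 = r0 + k + 1 := ⟨(r1 - r0 - 1).toNat, by omega⟩
    obtain ⟨m, hm⟩ : ∃ m : Nat, c1 = c0 + m + 1 := ⟨(c1 - c0 - 1).toNat, by omega⟩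
    subst hk; subst hm
    rw [PySem.List.foldl_append_singleton_eq_map, PySem.List.foldl_append_singleton_eq_map,
      List.nil_append,
      show r0 + (k : Int) + 1 + 1 = r0 + (k : Int) + 2 by ring,
      show c0 + (m : Int) + 1 + 1 = c0 + 1 + (m : Int) + 1 by ring,
      peel_down c0 k r0,
      corner_dr (r0 + (k : Int)) (r0 + (k : Int) + 1) c0 m (by ring),
      show c0 + (m : Int) + 1 = c0 + 1 + (m : Int) by ring,
      List.append_assoc, List.singleton_append]
  -- up-right
  · obtain ⟨k, hk⟩ : ∃ k : Nat, r1 = r0 - k - 1 := ⟨(r0 - r1 - 1).toNat, by omega⟩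
    obtain ⟨m, hm⟩ : ∃ m : Nat, c1 = c0 + m + 1 := ⟨(c1 - c0 - 1).toNat, by omega⟩
    subst hk; subst hm
    rw [PySem.List.foldl_append_singleton_eq_map, PySem.List.foldl_append_singleton_eq_map,
      List.nil_append,
      show r0 - (k : Int) - 1 + -1 = r0 - (k : Int) - 2 by ring,
      show c0 + (m : Int) + 1 + 1 = c0 + 1 + (m : Int) + 1 by ring,
      peel_up c0 k r0,
      corner_ur (r0 - (k : Int)) (r0 - (k : Int) - 1) c0 m (by ring),
      show c0 + (m : Int) + 1 = c0 + 1 + (m : Int) by ring,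
      List.append_assoc, List.singleton_append]
  -- horizontal-right (r1 = r0)
  · have e : r1 = r0 := by omega
    subst e
    obtain ⟨m, hm⟩ : ∃ m : Nat, c1 = c0 + m + 1 := ⟨(c1 - c0 - 1).toNat, by omega⟩
    subst hm
    rw [PySem.List.foldl_append_singleton_eq_map, List.nil_append,
      PySem.List.pyRange_one_singleton, List.map_singleton, List.singleton_append,
      show c0 + (m : Int) + 1 + 1 = c0 + 1 + (m : Int) + 1 by ring]
    have hr := hrun_right m (c0 + 1) r1
    rw [show c0 + 1 - 1 = c0 by ring] at hr
    rw [hr, show c0 + (m : Int) + 1 = c0 + 1 + (m : Int) by ring]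
  -- down-left
  · obtain ⟨k, hk⟩ : ∃ k : Nat, r1 = r0 + k + 1 := ⟨(r1 - r0 - 1).toNat, by omega⟩
    obtain ⟨m, hm⟩ : ∃ m : Nat, c1 = c0 - m - 1 := ⟨(c0 - c1 - 1).toNat, by omega⟩
    subst hk; subst hm
    rw [PySem.List.foldl_append_singleton_eq_map, PySem.List.foldl_append_singleton_eq_map,
      List.nil_append,
      show r0 + (k : Int) + 1 + 1 = r0 + (k : Int) + 2 by ring,
      show c0 + -1 = c0 - 1 by ring,
      show c0 - (m : Int) - 1 + -1 = c0 - 1 - (m : Int) - 1 by ring,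
      peel_down c0 k r0,
      corner_dl (r0 + (k : Int)) (r0 + (k : Int) + 1) c0 m (by ring),
      show c0 - (m : Int) - 1 = c0 - 1 - (m : Int) by ring,
      List.append_assoc, List.singleton_append]
  -- up-left
  · obtain ⟨k, hk⟩ : ∃ k : Nat, r1 = r0 - k - 1 := ⟨(r0 - r1 - 1).toNat, by omega⟩
    obtain ⟨m, hm⟩ : ∃ m : Nat, c1 = c0 - m - 1 := ⟨(c0 - c1 - 1).toNat, by omega⟩
    subst hk; subst hm
    rw [PySem.List.foldl_append_singleton_eq_map, PySem.List.foldl_append_singleton_eq_map,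
      List.nil_append,
      show r0 - (k : Int) - 1 + -1 = r0 - (k : Int) - 2 by ring,
      show c0 + -1 = c0 - 1 by ring,
      show c0 - (m : Int) - 1 + -1 = c0 - 1 - (m : Int) - 1 by ring,
      peel_up c0 k r0,
      corner_ul (r0 - (k : Int)) (r0 - (k : Int) - 1) c0 m (by ring),
      show c0 - (m : Int) - 1 = c0 - 1 - (m : Int) by ring,
      List.append_assoc, List.singleton_append]
  -- horizontal-left (r1 = r0)
  · have e : r1 = r0 := by omega
    subst e
    obtain ⟨m, hm⟩ : ∃ m : Nat, c1 = c0 - m - 1 := ⟨(c0 - c1 - 1).toNat, by omega⟩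
    subst hm
    rw [PySem.List.foldl_append_singleton_eq_map, List.nil_append,
      PySem.List.pyRange_one_singleton, List.map_singleton, List.singleton_append,
      show c0 + -1 = c0 - 1 by ring,
      show c0 - (m : Int) - 1 + -1 = c0 - 1 - (m : Int) - 1 by ring]
    have hl := hrun_left m (c0 - 1) r1
    rw [show c0 - 1 + 1 = c0 by ring] at hl
    rw [hl, show c0 - (m : Int) - 1 = c0 - 1 - (m : Int) by ring]
  -- down, vertical only (c1 = c0)
  · have e : c1 = c0 := by omega
    subst e
    obtain ⟨k, hk⟩ : ∃ k : Nat, r1 = r0 + k + 1 := ⟨(r1 - r0 - 1).toNat, by omega⟩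
    subst hk
    rw [PySem.List.foldl_append_singleton_eq_map, List.nil_append,
      show r0 + (k : Int) + 1 + 1 = r0 + (k : Int) + 2 by ring,
      PySem.List.pyRange_one_eq_nil (le_refl (c1 + 1)), List.map_nil, List.append_nil,
      show ((PySem.List.pyRange r0 (r0 + (k : Int) + 2) 1).map (fun r => (r, c1)))
          = ((PySem.List.pyRange r0 (r0 + (k : Int) + 2) 1).map (fun r => (r, c1))) ++ [] by
        rw [List.append_nil],
      peel_down c1 k r0]
    simp [gwalk]
  -- up, vertical only (c1 = c0)
  · have e : c1 = c0 := by omega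
    subst e
    obtain ⟨k, hk⟩ : ∃ k : Nat, r1 = r0 - k - 1 := ⟨(r0 - r1 - 1).toNat, by omega⟩
    subst hk
    rw [PySem.List.foldl_append_singleton_eq_map, List.nil_append,
      show r0 - (k : Int) - 1 + -1 = r0 - (k : Int) - 2 by ring,
      PySem.List.pyRange_one_eq_nil (le_refl (c1 + 1)), List.map_nil, List.append_nil,
      show ((PySem.List.pyRange r0 (r0 - (k : Int) - 2) (-1)).map (fun r => (r, c1)))
          = ((PySem.List.pyRange r0 (r0 - (k : Int) - 2) (-1)).map (fun r => (r, c1))) ++ [] by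
        rw [List.append_nil],
      peel_up c1 k r0]
    simp [gwalk]
  -- start = goal
  · have e1 : r1 = r0 := by omega
    have e2 : c1 = c0 := by omega
    subst e1; subst e2
    rw [PySem.List.pyRange_one_singleton,
      PySem.List.pyRange_one_eq_nil (le_refl (c1 + 1)), List.map_nil, List.append_nil]
    simp [gwalk]
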